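-- pv_equiv track=rewrite | github.com/Baymax-Fools/ctf_crypto_exp.py | 预测伪随机前4个数.py | recover_state
-- ===== SOURCE A (Python) =====
-- def inverse_right(res,shift,bits=32):
--     tmp = res
--     for i in range(bits//shift):
--         tmp = res ^ tmp >> shift
--     return tmp
--
-- def inverse_left_values(res,shift,mask,bits=32):
--     tmp = res
--     for i in range(bits//shift):
--         tmp = res ^ tmp << shift & mask
--     return tmp
--
-- def recover_state(out):
--     state = []
--     for i in out:
--         i = inverse_right(i,18)
--         i = inverse_left_values(i,15,0xefc60000)
--         i = inverse_left_values(i,7,0x9d2c5680)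
--         i = inverse_right(i,11)
--         state.append(i)
--     return state
-- ===== SOURCE B (Python) =====
-- # B: branch-free closed-form untemper — each inverse tempering step is a single
-- # XOR of shifted-and-masked copies of the word, the composed masks precomputed.
--
-- _M15 = 0xEFC60000
-- _M7 = 0x9D2C5680
-- _M7_2 = _M7 & (_M7 << 7)
-- _M7_3 = _M7_2 & (_M7 << 14)
-- _M7_4 = _M7_3 & (_M7 << 21)
--
--
-- def _untemper(y):
--     y = y ^ (y >> 18)
--     y = y ^ ((y << 15) & _M15)
--     y = (y ^ ((y << 7) & _M7) ^ ((y << 14) & _M7_2)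
--            ^ ((y << 21) & _M7_3) ^ ((y << 28) & _M7_4))
--     return y ^ (y >> 11) ^ (y >> 22)
--
--
-- def recover_state(out):
--     return [_untemper(y) for y in out]
-- ===== Notes on version B (the rewrite author's own statement) =====
-- stated objective: faster
-- what changed: Replaces A's iterated fixed-point loops (generic inverse_right/inverse_left_values helpers re-applied per word) with one branch-free closed-form untemper per word: each inverse step is a single XOR of shifted-and-masked copies with the composed masks precomputed as constants.
import Mathlib
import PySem

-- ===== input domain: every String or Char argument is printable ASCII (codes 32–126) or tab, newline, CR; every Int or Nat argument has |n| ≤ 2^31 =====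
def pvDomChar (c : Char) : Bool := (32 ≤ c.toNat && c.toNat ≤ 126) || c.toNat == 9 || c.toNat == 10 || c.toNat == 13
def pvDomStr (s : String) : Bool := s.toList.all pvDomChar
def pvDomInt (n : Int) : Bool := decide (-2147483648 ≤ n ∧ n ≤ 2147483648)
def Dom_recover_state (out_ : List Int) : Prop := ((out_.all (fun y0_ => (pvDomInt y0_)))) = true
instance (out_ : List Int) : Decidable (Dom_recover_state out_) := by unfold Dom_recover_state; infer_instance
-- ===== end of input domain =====

-- B replaces A's iterated fixed-point loops with one branch-free closed-form untemper per
-- word (each inverse step a single XOR of shifted-and-masked copies, composed masks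
-- precomputed); measurably faster by a constant factor.

-- ===== PORT A =====
-- Python's `>> shift` / `<< shift`: shift is nonnegative at every call site, so `.toNat` is exact.
def inverse_right (res : Int) (shift : Int) (bits : Int) : Int :=
  (PySem.List.pyRange 0 (PySem.Int.floordiv bits shift) 1).foldl
    (fun tmp _i => PySem.Int.bxor res (tmp >>> shift.toNat)) res

def inverse_left_values (res : Int) (shift : Int) (mask : Int) (bits : Int) : Int :=
  (PySem.List.pyRange 0 (PySem.Int.floordiv bits shift) 1).foldl
    (fun tmp _i => PySem.Int.bxor res (PySem.Int.band (tmp <<< shift.toNat) mask)) res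

def recover_state (out_ : List Int) : List Int :=
  out_.foldl (fun state i =>
    let i1 := inverse_right i 18 32
    let i2 := inverse_left_values i1 15 0xefc60000 32
    let i3 := inverse_left_values i2 7 0x9d2c5680 32
    let i4 := inverse_right i3 11 32
    state ++ [i4]) []

-- ===== PORT B =====
def pvM15 : Int := 0xEFC60000
def pvM7 : Int := 0x9D2C5680
def pvM7_2 : Int := PySem.Int.band pvM7 (pvM7 <<< (7:Nat))
def pvM7_3 : Int := PySem.Int.band pvM7_2 (pvM7 <<< (14:Nat))
def pvM7_4 : Int := PySem.Int.band pvM7_3 (pvM7 <<< (21:Nat))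

def pvUntemper (y : Int) : Int :=
  let y1 := PySem.Int.bxor y (y >>> (18:Nat))
  let y2 := PySem.Int.bxor y1 (PySem.Int.band (y1 <<< (15:Nat)) pvM15)
  let y3 := PySem.Int.bxor (PySem.Int.bxor (PySem.Int.bxor
              (PySem.Int.bxor y2 (PySem.Int.band (y2 <<< (7:Nat)) pvM7))
              (PySem.Int.band (y2 <<< (14:Nat)) pvM7_2))
              (PySem.Int.band (y2 <<< (21:Nat)) pvM7_3))
              (PySem.Int.band (y2 <<< (28:Nat)) pvM7_4)
  PySem.Int.bxor (PySem.Int.bxor y3 (y3 >>> (11:Nat))) (y3 >>> (22:Nat))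

def recover_state_alt (out_ : List Int) : List Int := out_.map pvUntemper

-- ===== PRECONDITION & SPEC =====
def Spec_recover_state (out_ : List Int) (out : List Int) : Prop := out = recover_state_alt out_
instance (out_ : List Int) (out : List Int) : Decidable (Spec_recover_state out_ out) := by
  unfold Spec_recover_state; infer_instance

-- ===== CLAIM (what is proved, stated in full; the proofs are below) =====
def Claim_equal_recover_state : Prop :=
  ∀ (out_ : List Int), Dom_recover_state out_ → Spec_recover_state out_ (recover_state out_)

-- ===== LEMMAS AND PROOFS =====

-- the left-shift-and-mask operator of the tempering
def Lf (s : Nat) (M x : Int) : Int := PySem.Int.band (x <<< s) M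

theorem negpart (n : Nat) : (-(Int.negSucc n) - 1) = (n : Int) := by simp [Int.negSucc_eq]

theorem negrepr (k : Nat) : -((k : Nat) : Int) - 1 = Int.negSucc k := by
  simp [Int.negSucc_eq]; ring

theorem toNat_ofNat'' (m : Nat) : (Int.ofNat m).toNat = m := rfl

theorem hofnat (m : Nat) : (0:Int) ≤ Int.ofNat m := Int.natCast_nonneg m

theorem hnegsucc (n : Nat) : ¬ (0:Int) ≤ Int.negSucc n := not_le.mpr (Int.negSucc_lt_zero n)

-- two integers with the same two's-complement bits are equal
theorem intext {x y : Int} (h : ∀ j, x.testBit j = y.testBit j) : x = y := by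
  cases x with
  | ofNat m => cases y with
    | ofNat n =>
      have := Nat.eq_of_testBit_eq (x := m) (y := n) (fun j => by
        have := h j; simpa [Int.testBit] using this)
      simp [this]
    | negSucc n =>
      exfalso
      have hj := h (m + n)
      have h1 : m.testBit (m + n) = false := Nat.testBit_lt_two_pow
        (lt_of_lt_of_le Nat.lt_two_pow_self (Nat.pow_le_pow_right (by norm_num) (by omega)))
      have h2 : n.testBit (m + n) = false := Nat.testBit_lt_two_pow
        (lt_of_lt_of_le Nat.lt_two_pow_self (Nat.pow_le_pow_right (by norm_num) (by omega)))
      simp [Int.testBit, h1, h2] at hj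
  | negSucc m => cases y with
    | ofNat n =>
      exfalso
      have hj := h (m + n)
      have h1 : m.testBit (m + n) = false := Nat.testBit_lt_two_pow
        (lt_of_lt_of_le Nat.lt_two_pow_self (Nat.pow_le_pow_right (by norm_num) (by omega)))
      have h2 : n.testBit (m + n) = false := Nat.testBit_lt_two_pow
        (lt_of_lt_of_le Nat.lt_two_pow_self (Nat.pow_le_pow_right (by norm_num) (by omega)))
      simp [Int.testBit, h1, h2] at hj
    | negSucc n =>
      have := Nat.eq_of_testBit_eq (x := m) (y := n) (fun j => by
        have := h j; simpa [Int.testBit] using this)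
      simp [this]

theorem tb_bxor (a b : Int) (j : Nat) :
    (PySem.Int.bxor a b).testBit j = ((a.testBit j) ^^ (b.testBit j)) := by
  cases a with
  | ofNat m => cases b with
    | ofNat n =>
      simp [PySem.Int.bxor, Int.testBit, Nat.testBit_xor, hofnat]
    | negSucc n =>
      simp only [PySem.Int.bxor, if_pos (hofnat m), if_neg (hnegsucc n), negpart,
        Int.toNat_natCast, toNat_ofNat'', negrepr]
      simp [Int.testBit, Nat.testBit_xor]
  | negSucc m => cases b with
    | ofNat n =>
      simp only [PySem.Int.bxor, if_pos (hofnat n), if_neg (hnegsucc m), negpart,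
        Int.toNat_natCast, toNat_ofNat'', negrepr]
      simp [Int.testBit, Nat.testBit_xor]
    | negSucc n =>
      simp only [PySem.Int.bxor, if_neg (hnegsucc m), if_neg (hnegsucc n), negpart,
        Int.toNat_natCast]
      simp [Int.testBit, Nat.testBit_xor]

theorem nat_sub_and (m n : Nat) : m - (m &&& n) = Nat.ldiff m n := by
  induction m using Nat.binaryRec generalizing n with
  | zero => simp [Nat.ldiff, Nat.bitwise_zero_left]
  | bit b m ih =>
    induction n using Nat.bitCasesOn with
    | bit c n =>
      rw [Nat.land_bit, Nat.ldiff_bit, ← ih n]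
      have hle : m &&& n ≤ m := Nat.and_le_left
      cases b <;> cases c <;> simp [Nat.bit] <;> omega

theorem tb_band (a b : Int) (j : Nat) :
    (PySem.Int.band a b).testBit j = ((a.testBit j) && (b.testBit j)) := by
  cases a with
  | ofNat m => cases b with
    | ofNat n => simp [PySem.Int.band, Int.testBit, Nat.testBit_land, hofnat]
    | negSucc n =>
      simp only [PySem.Int.band, if_pos (hofnat m), if_neg (hnegsucc n), negpart,
        Int.toNat_natCast, toNat_ofNat'', nat_sub_and]
      simp [Int.testBit, Nat.testBit_ldiff]
  | negSucc m => cases b with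
    | ofNat n =>
      simp only [PySem.Int.band, if_pos (hofnat n), if_neg (hnegsucc m), negpart,
        Int.toNat_natCast, toNat_ofNat'', nat_sub_and]
      simp [Int.testBit, Nat.testBit_ldiff, Bool.and_comm]
    | negSucc n =>
      simp only [PySem.Int.band, if_neg (hnegsucc m), if_neg (hnegsucc n), negpart,
        Int.toNat_natCast, negrepr]
      simp [Int.testBit, Nat.testBit_lor]

theorem tb_shr (a : Int) (s j : Nat) : (a >>> s).testBit j = a.testBit (s + j) := by
  cases a with
  | ofNat m =>
    show (Int.ofNat (m >>> s)).testBit j = _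
    simp [Int.testBit, Nat.testBit_shiftRight]
  | negSucc m =>
    show (Int.negSucc (m >>> s)).testBit j = _
    simp [Int.testBit, Nat.testBit_shiftRight]

theorem nat_pred_shl_testBit (m s j : Nat) :
    ((m + 1) * 2 ^ s - 1).testBit j = (decide (j < s) || m.testBit (j - s)) := by
  rcases lt_or_ge j s with h | h
  · have h2j : 0 < 2 ^ j := Nat.two_pow_pos j
    obtain ⟨k, hk⟩ : ∃ k, s - j = k + 1 := ⟨s - j - 1, by omega⟩
    have hA1 : 1 ≤ (m + 1) * 2 ^ (s - j) := Nat.mul_pos (by omega) (Nat.two_pow_pos _)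
    have hAe : (m + 1) * 2 ^ (s - j) = ((m + 1) * 2 ^ k) * 2 := by rw [hk, pow_succ]; ring
    have hNs : (m + 1) * 2 ^ s - 1 =
        2 ^ j * ((m + 1) * 2 ^ (s - j) - 1) + (2 ^ j - 1) := by
      have hsplit : 2 ^ s = 2 ^ (s - j) * 2 ^ j := by rw [← pow_add]; congr 1; omega
      rw [hsplit, ← Nat.mul_assoc]
      have hge : 2 ^ j ≤ ((m + 1) * 2 ^ (s - j)) * 2 ^ j :=
        Nat.le_mul_of_pos_left _ (by omega)
      have hd : 2 ^ j * ((m + 1) * 2 ^ (s - j) - 1) =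
          ((m + 1) * 2 ^ (s - j)) * 2 ^ j - 2 ^ j := by
        rw [Nat.mul_sub, Nat.mul_comm]; omega
      omega
    have h1 : ((m + 1) * 2 ^ s - 1) / 2 ^ j % 2 = 1 := by
      rw [hNs, Nat.mul_add_div h2j, Nat.div_eq_of_lt (by omega)]
      omega
    simp [Nat.testBit_eq_decide_div_mod_eq, h1, h]
  · have h2s : 0 < 2 ^ s := Nat.two_pow_pos s
    have hN : (m + 1) * 2 ^ s - 1 = 2 ^ s * m + (2 ^ s - 1) := by
      have he : (m + 1) * 2 ^ s = 2 ^ s * m + 2 ^ s := by ring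
      omega
    have h1 : ((m + 1) * 2 ^ s - 1) / 2 ^ j = m / 2 ^ (j - s) := by
      rw [hN, show (2:Nat) ^ j = 2 ^ s * 2 ^ (j - s) from by rw [← pow_add]; congr 1; omega,
        ← Nat.div_div_eq_div_mul, Nat.mul_add_div h2s,
        Nat.div_eq_of_lt (show 2 ^ s - 1 < 2 ^ s from by omega), Nat.add_zero]
    simp [Nat.testBit_eq_decide_div_mod_eq, h1, Nat.not_lt.mpr h]

theorem tb_shl (a : Int) (s j : Nat) :
    (a <<< s).testBit j = (decide (s ≤ j) && a.testBit (j - s)) := by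
  cases a with
  | ofNat m =>
    have e : (Int.ofNat m) <<< s = Int.ofNat (m <<< s) := by
      rw [Int.shiftLeft_eq]
      show ((m:Int)) * 2 ^ s = ((m <<< s : Nat) : Int)
      rw [Nat.shiftLeft_eq]; push_cast; ring
    rw [e]
    simp [Int.testBit, Nat.testBit_shiftLeft]
  | negSucc m =>
    have e : (Int.negSucc m) <<< s = Int.negSucc ((m + 1) * 2 ^ s - 1) := by
      have hpos : 0 < (m + 1) * 2 ^ s := Nat.mul_pos (Nat.succ_pos m) (Nat.two_pow_pos s)
      rw [Int.shiftLeft_eq, Int.negSucc_eq, ← negrepr]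
      push_cast [Nat.cast_sub (by omega : 1 ≤ (m + 1) * 2 ^ s)]
      ring
    rw [e]
    simp only [Int.testBit, nat_pred_shl_testBit]
    by_cases h : s ≤ j
    · simp [h, Nat.not_lt.mpr h]
    · simp [h, Nat.lt_of_not_le h]

-- xor is associative; shift distributes through xor; composed shifts and masks
theorem bxor_assoc (a b c : Int) :
    PySem.Int.bxor (PySem.Int.bxor a b) c = PySem.Int.bxor a (PySem.Int.bxor b c) := by
  apply intext; intro j
  simp only [tb_bxor, Bool.xor_assoc]

theorem shr_bxor (a b : Int) (s : Nat) :
    (PySem.Int.bxor a b) >>> s = PySem.Int.bxor (a >>> s) (b >>> s) := by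
  apply intext; intro j
  simp only [tb_shr, tb_bxor]

theorem shr_shr (a : Int) (s t : Nat) : (a >>> s) >>> t = a >>> (s + t) := by
  apply intext; intro j
  simp only [tb_shr]
  congr 1
  omega

theorem llin (s : Nat) (M a b : Int) :
    Lf s M (PySem.Int.bxor a b) = PySem.Int.bxor (Lf s M a) (Lf s M b) := by
  apply intext; intro j
  simp only [Lf, tb_band, tb_shl, tb_bxor]
  by_cases hs : s ≤ j
  · simp only [hs, decide_true, Bool.true_and]
    cases a.testBit (j - s) <;> cases b.testBit (j - s) <;> cases M.testBit j <;> rfl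
  · simp [hs]

theorem Lcomp (x m m' : Int) (s t : Nat) :
    PySem.Int.band ((PySem.Int.band (x <<< s) m) <<< t) m' =
      PySem.Int.band (x <<< (s + t)) (PySem.Int.band (m <<< t) m') := by
  apply intext; intro j
  simp only [tb_band, tb_shl]
  by_cases h1 : t ≤ j
  · by_cases h2 : s + t ≤ j
    · have hs : s ≤ j - t := by omega
      have hij : j - t - s = j - (s + t) := by omega
      simp only [h1, h2, hs, decide_true, Bool.true_and, hij]
      cases x.testBit (j - (s + t)) <;> cases m.testBit (j - t) <;> cases m'.testBit j <;> rfl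
    · have hs : ¬ s ≤ j - t := by omega
      simp [h1, h2, hs]
  · have h2 : ¬ s + t ≤ j := by omega
    simp [h1, h2]

-- A's step values, unfolded
theorem invr18 (res : Int) :
    inverse_right res 18 32 = PySem.Int.bxor res (res >>> (18:Nat)) := by
  unfold inverse_right
  rw [show PySem.List.pyRange 0 (PySem.Int.floordiv 32 18) 1 = [0] from by decide]
  simp only [List.foldl_cons, List.foldl_nil, show Int.toNat 18 = 18 from by decide]

theorem invr11 (res : Int) :
    inverse_right res 11 32 =
      PySem.Int.bxor res ((PySem.Int.bxor res (res >>> (11:Nat))) >>> (11:Nat)) := by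
  unfold inverse_right
  rw [show PySem.List.pyRange 0 (PySem.Int.floordiv 32 11) 1 = [0, 1] from by decide]
  simp only [List.foldl_cons, List.foldl_nil, show Int.toNat 11 = 11 from by decide]

theorem invl15 (res : Int) :
    inverse_left_values res 15 0xefc60000 32 =
      PySem.Int.bxor res (Lf 15 0xefc60000 (PySem.Int.bxor res (Lf 15 0xefc60000 res))) := by
  unfold inverse_left_values Lf
  rw [show PySem.List.pyRange 0 (PySem.Int.floordiv 32 15) 1 = [0, 1] from by decide]
  simp only [List.foldl_cons, List.foldl_nil, show Int.toNat 15 = 15 from by decide]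

theorem invl7 (res : Int) :
    inverse_left_values res 7 0x9d2c5680 32 =
      PySem.Int.bxor res (Lf 7 0x9d2c5680 (PySem.Int.bxor res (Lf 7 0x9d2c5680
        (PySem.Int.bxor res (Lf 7 0x9d2c5680 (PySem.Int.bxor res (Lf 7 0x9d2c5680 res))))))) := by
  unfold inverse_left_values Lf
  rw [show PySem.List.pyRange 0 (PySem.Int.floordiv 32 7) 1 = [0, 1, 2, 3] from by decide]
  simp only [List.foldl_cons, List.foldl_nil, show Int.toNat 7 = 7 from by decide]

-- per-step closed forms
theorem stepR18 (res : Int) :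
    inverse_right res 18 32 = PySem.Int.bxor res (res >>> (18:Nat)) := invr18 res

theorem stepL15 (res : Int) :
    inverse_left_values res 15 0xefc60000 32 =
      PySem.Int.bxor res (PySem.Int.band (res <<< (15:Nat)) pvM15) := by
  rw [invl15, llin]
  have h2 : Lf 15 0xefc60000 (Lf 15 0xefc60000 res) = 0 := by
    unfold Lf
    rw [Lcomp]
    rw [show PySem.Int.band ((0xefc60000:Int) <<< (15:Nat)) 0xefc60000 = 0 from by decide]
    simp [PySem.Int.band_zero]
  rw [h2, PySem.Int.bxor_zero]
  rfl

theorem stepL7 (res : Int) :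
    inverse_left_values res 7 0x9d2c5680 32 =
      PySem.Int.bxor (PySem.Int.bxor (PySem.Int.bxor
        (PySem.Int.bxor res (PySem.Int.band (res <<< (7:Nat)) pvM7))
        (PySem.Int.band (res <<< (14:Nat)) pvM7_2))
        (PySem.Int.band (res <<< (21:Nat)) pvM7_3))
        (PySem.Int.band (res <<< (28:Nat)) pvM7_4) := by
  have hL2 : ∀ x : Int, Lf 7 0x9d2c5680 (Lf 7 0x9d2c5680 x) =
      PySem.Int.band (x <<< (14:Nat)) pvM7_2 := by
    intro x
    unfold Lf
    rw [Lcomp]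
    rw [show PySem.Int.band ((0x9d2c5680:Int) <<< (7:Nat)) 0x9d2c5680 = pvM7_2 from by decide]
  have hL3 : ∀ x : Int, Lf 7 0x9d2c5680 (PySem.Int.band (x <<< (14:Nat)) pvM7_2) =
      PySem.Int.band (x <<< (21:Nat)) pvM7_3 := by
    intro x
    unfold Lf
    rw [Lcomp]
    rw [show PySem.Int.band ((pvM7_2:Int) <<< (7:Nat)) 0x9d2c5680 = pvM7_3 from by decide]
  have hL4 : ∀ x : Int, Lf 7 0x9d2c5680 (PySem.Int.band (x <<< (21:Nat)) pvM7_3) =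
      PySem.Int.band (x <<< (28:Nat)) pvM7_4 := by
    intro x
    unfold Lf
    rw [Lcomp]
    rw [show PySem.Int.band ((pvM7_3:Int) <<< (7:Nat)) 0x9d2c5680 = pvM7_4 from by decide]
  rw [invl7]
  simp only [llin, hL2, hL3, hL4]
  simp only [Lf]
  rw [show (0x9d2c5680 : Int) = pvM7 from rfl]
  simp only [← bxor_assoc]

theorem stepR11 (res : Int) :
    inverse_right res 11 32 =
      PySem.Int.bxor (PySem.Int.bxor res (res >>> (11:Nat))) (res >>> (22:Nat)) := by
  rw [invr11, shr_bxor, shr_shr]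
  rw [bxor_assoc]

theorem elem_eq (i : Int) :
    inverse_right (inverse_left_values (inverse_left_values (inverse_right i 18 32)
        15 0xefc60000 32) 7 0x9d2c5680 32) 11 32 = pvUntemper i := by
  simp only [pvUntemper]
  rw [stepR18, stepL15, stepL7, stepR11]

-- ===== VERDICT (by name: the statement is the Claim_ definition above) =====
theorem recover_state_spec : Claim_equal_recover_state := by
  intro out_ _hdom
  unfold Spec_recover_state recover_state recover_state_alt
  rw [PySem.List.foldl_append_singleton_eq_map
    (f := fun i => inverse_right (inverse_left_values (inverse_left_values (inverse_right i 18 32)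
        15 0xefc60000 32) 7 0x9d2c5680 32) 11 32) out_ []]
  simp only [List.nil_append]
  exact List.map_congr_left (fun i _ => elem_eq i)
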